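-- pv_equiv track=rewrite | github.com/exal99/pascal | pascal.py | pascalPlane
-- ===== SOURCE A (Python) =====
-- def pascalPlane(n, prevPlane):
-- 	plane =[]
-- 	for row in range(n):
-- 		created_row = []
-- 		for col in range(row + 1):
-- 			s = 0
-- 			for pos in ((col,row), (col, row-1), (col-1, row-1)):
-- 				if pos[0] > -1 and pos[1] > -1 and pos[1] < len(prevPlane) and pos[0] < len(prevPlane[pos[1]]):
-- 					s += prevPlane[pos[1]][pos[0]]
-- 			created_row.append(s)
-- 		plane.append(created_row)
-- 	return plane
-- ===== SOURCE B (Python) =====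
-- def pascalPlane(n, prevPlane):
-- 	plane = []
-- 	for row in range(n):
-- 		cur = prevPlane[row] if row < len(prevPlane) else []
-- 		above = prevPlane[row - 1] if 0 < row <= len(prevPlane) else []
-- 		width = row + 1
-- 		x = (cur + [0] * width)[:width]
-- 		y = (above + [0] * width)[:width]
-- 		z = [0] + y[:row]
-- 		plane.append([a + b + c for a, b, c in zip(x, y, z)])
-- 	return plane
-- ===== Notes on version B (the rewrite author's own statement) =====
-- stated objective: alternative
-- what changed: B builds each output row in one vectorized pass by padding/shifting the two relevant prevPlane rows and zip-adding three aligned lists, instead of A's per-cell loop over three bounds-checked lookups.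
import Mathlib
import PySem

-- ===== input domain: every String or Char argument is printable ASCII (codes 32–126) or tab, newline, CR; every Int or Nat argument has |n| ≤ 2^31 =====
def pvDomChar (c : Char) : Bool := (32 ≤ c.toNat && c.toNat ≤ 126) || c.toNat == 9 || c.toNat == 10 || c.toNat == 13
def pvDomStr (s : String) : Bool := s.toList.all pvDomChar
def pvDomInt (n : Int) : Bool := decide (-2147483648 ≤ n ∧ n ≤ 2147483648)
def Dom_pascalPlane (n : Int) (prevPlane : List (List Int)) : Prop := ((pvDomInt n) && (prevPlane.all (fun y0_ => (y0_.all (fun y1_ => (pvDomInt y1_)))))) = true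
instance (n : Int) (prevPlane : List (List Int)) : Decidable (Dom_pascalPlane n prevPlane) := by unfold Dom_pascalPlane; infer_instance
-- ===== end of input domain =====

-- B builds each output row in one pass by zipping three padded/shifted copies of the
-- relevant prevPlane rows instead of A's per-cell triple bounds-checked lookups (objective: alternative).

-- ===== PORT A =====
def pascalPlane (n : Int) (prevPlane : List (List Int)) : List (List Int) :=
  (PySem.List.pyRange 0 n 1).foldl (fun plane row =>
    plane ++ [(PySem.List.pyRange 0 (row + 1) 1).foldl (fun created_row col =>
      created_row ++ [[(col, row), (col, row - 1), (col - 1, row - 1)].foldl (fun s pos =>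
        if pos.1 > -1 ∧ pos.2 > -1 ∧ pos.2 < (prevPlane.length : Int) ∧
            pos.1 < (((PySem.List.pyGet? prevPlane pos.2).getD []).length : Int)
        then s + (PySem.List.pyGet? ((PySem.List.pyGet? prevPlane pos.2).getD []) pos.1).getD 0
        else s) 0]) []]) []

-- ===== PORT B =====
def pascalPlane_alt (n : Int) (prevPlane : List (List Int)) : List (List Int) :=
  (PySem.List.pyRange 0 n 1).foldl (fun plane row =>
    let cur := if row < (prevPlane.length : Int) then (PySem.List.pyGet? prevPlane row).getD [] else []
    let above := if 0 < row ∧ row ≤ (prevPlane.length : Int) then (PySem.List.pyGet? prevPlane (row - 1)).getD [] else []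
    let width := (row + 1).toNat
    let x := (cur ++ List.replicate width 0).take width
    let y := (above ++ List.replicate width 0).take width
    let z := 0 :: y.take row.toNat
    plane ++ [(x.zip (y.zip z)).map (fun t => t.1 + t.2.1 + t.2.2)]) []

-- ===== PRECONDITION & SPEC =====
def Spec_pascalPlane (n : Int) (prevPlane : List (List Int)) (out : List (List Int)) : Prop := out = pascalPlane_alt n prevPlane
instance (n : Int) (prevPlane : List (List Int)) (out : List (List Int)) : Decidable (Spec_pascalPlane n prevPlane out) := by unfold Spec_pascalPlane; infer_instance

-- ===== CLAIM (what is proved, stated in full; the proofs are below) =====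
def Claim_equal_pascalPlane : Prop := ∀ (n : Int) (prevPlane : List (List Int)), Dom_pascalPlane n prevPlane → Spec_pascalPlane n prevPlane (pascalPlane n prevPlane)

-- ===== LEMMAS AND PROOFS =====

-- the value A's three-position lookup contributes when reading prevPlane at row r, column c (0 when out of range)
def pvG (pp : List (List Int)) (r c : Int) : Int :=
  if 0 ≤ r ∧ 0 ≤ c then (PySem.List.pyGet? ((PySem.List.pyGet? pp r).getD []) c).getD 0 else 0

lemma pvG_term (pp : List (List Int)) (r c acc : Int) :
    (if c > -1 ∧ r > -1 ∧ r < (pp.length : Int) ∧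
        c < (((PySem.List.pyGet? pp r).getD []).length : Int)
     then acc + (PySem.List.pyGet? ((PySem.List.pyGet? pp r).getD []) c).getD 0
     else acc) = acc + pvG pp r c := by
  unfold pvG
  by_cases h : c > -1 ∧ r > -1 ∧ r < (pp.length : Int) ∧
      c < (((PySem.List.pyGet? pp r).getD []).length : Int)
  · rw [if_pos h, if_pos ⟨by omega, by omega⟩]
  · rw [if_neg h]
    by_cases h2 : 0 ≤ r ∧ 0 ≤ c
    · rw [if_pos h2]
      push Not at h
      by_cases hr : r < (pp.length : Int)
      · have hc := h (by omega) (by omega) hr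
        have hn : PySem.List.pyGet? ((PySem.List.pyGet? pp r).getD []) c = none := by
          rw [PySem.List.pyGet?_eq_none_iff]
          simp [PySem.Raise.InRange]; omega
        simp [hn]
      · have hn : PySem.List.pyGet? pp r = none := by
          rw [PySem.List.pyGet?_eq_none_iff]
          simp [PySem.Raise.InRange]; omega
        have hn2 : PySem.List.pyGet? ((PySem.List.pyGet? pp r).getD []) c = none := by
          rw [PySem.List.pyGet?_eq_none_iff]
          simp [PySem.Raise.InRange, hn]
        simp [hn2]
    · rw [if_neg h2]; simp

lemma rowA_eq (pp : List (List Int)) (row : Int) :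
    (PySem.List.pyRange 0 (row + 1) 1).foldl (fun created_row col =>
      created_row ++ [[(col, row), (col, row - 1), (col - 1, row - 1)].foldl (fun s pos =>
        if pos.1 > -1 ∧ pos.2 > -1 ∧ pos.2 < (pp.length : Int) ∧
            pos.1 < (((PySem.List.pyGet? pp pos.2).getD []).length : Int)
        then s + (PySem.List.pyGet? ((PySem.List.pyGet? pp pos.2).getD []) pos.1).getD 0
        else s) 0]) []
    = (PySem.List.pyRange 0 (row + 1) 1).map
        (fun col => 0 + pvG pp row col + pvG pp (row - 1) col + pvG pp (row - 1) (col - 1)) := by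
  rw [PySem.List.foldl_append_singleton_eq_map]
  simp only [List.nil_append, List.foldl_cons, List.foldl_nil, pvG_term]

lemma padget (l : List Int) (w k : Nat) (_hk : k < w)
    (h : k < ((l ++ List.replicate w (0:Int)).take w).length) :
    ((l ++ List.replicate w (0:Int)).take w)[k] = l.getD k 0 := by
  rw [List.getElem_take]
  by_cases hl : k < l.length
  · rw [List.getElem_append_left hl, List.getD_eq_getElem l 0 hl]
  · rw [List.getElem_append_right (Nat.le_of_not_lt hl), List.getElem_replicate,
        List.getD_eq_default l 0 (Nat.le_of_not_lt hl)]

lemma padget' (l : List Int) (w k : Nat)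
    (h : k < (l ++ List.replicate w (0:Int)).length) :
    (l ++ List.replicate w (0:Int))[k] = l.getD k 0 := by
  by_cases hl : k < l.length
  · rw [List.getElem_append_left hl, List.getD_eq_getElem l 0 hl]
  · rw [List.getElem_append_right (Nat.le_of_not_lt hl), List.getElem_replicate,
        List.getD_eq_default l 0 (Nat.le_of_not_lt hl)]

lemma pvG_of_nonneg (pp : List (List Int)) (r : Int) (hr : 0 ≤ r) (k : Nat) :
    pvG pp r (k : Int) = ((PySem.List.pyGet? pp r).getD []).getD k 0 := by
  unfold pvG
  rw [if_pos ⟨hr, by omega⟩, PySem.List.pyGet?_natCast]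
  rfl

lemma getD_if_cur (pp : List (List Int)) (row : Int) (hrow : 0 ≤ row) (k : Nat) :
    (if row < (pp.length : Int) then (PySem.List.pyGet? pp row).getD [] else []).getD k 0
      = pvG pp row (k : Int) := by
  by_cases h : row < (pp.length : Int)
  · rw [if_pos h, pvG_of_nonneg pp row hrow k]
  · rw [if_neg h]
    have hn : PySem.List.pyGet? pp row = none := by
      rw [PySem.List.pyGet?_eq_none_iff]; simp [PySem.Raise.InRange]; omega
    rw [pvG_of_nonneg pp row hrow k, hn]
    rfl

lemma getD_if_above (pp : List (List Int)) (row : Int) (hrow : 0 ≤ row) (k : Nat) :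
    (if 0 < row ∧ row ≤ (pp.length : Int) then (PySem.List.pyGet? pp (row - 1)).getD [] else []).getD k 0
      = pvG pp (row - 1) (k : Int) := by
  by_cases h : 0 < row ∧ row ≤ (pp.length : Int)
  · rw [if_pos h, pvG_of_nonneg pp (row - 1) (by omega) k]
  · rw [if_neg h]
    by_cases h0 : 0 < row
    · have hn : PySem.List.pyGet? pp (row - 1) = none := by
        rw [PySem.List.pyGet?_eq_none_iff]; simp [PySem.Raise.InRange]; omega
      rw [pvG_of_nonneg pp (row - 1) (by omega) k, hn]
      rfl
    · have : pvG pp (row - 1) (k : Int) = 0 := by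
        unfold pvG; rw [if_neg (by omega)]
      rw [this]; rfl

lemma rowB_eq (pp : List (List Int)) (row : Int) (hrow : 0 ≤ row) :
    List.map (fun t : Int × Int × Int => t.1 + t.2.1 + t.2.2)
      (List.zip
        (List.take (row + 1).toNat ((if row < (pp.length : Int) then (PySem.List.pyGet? pp row).getD [] else []) ++ List.replicate (row + 1).toNat 0))
        (List.zip
          (List.take (row + 1).toNat ((if 0 < row ∧ row ≤ (pp.length : Int) then (PySem.List.pyGet? pp (row - 1)).getD [] else []) ++ List.replicate (row + 1).toNat 0))
          (0 :: List.take row.toNat (List.take (row + 1).toNat ((if 0 < row ∧ row ≤ (pp.length : Int) then (PySem.List.pyGet? pp (row - 1)).getD [] else []) ++ List.replicate (row + 1).toNat 0)))))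
    = (PySem.List.pyRange 0 (row + 1) 1).map
        (fun col => 0 + pvG pp row col + pvG pp (row - 1) col + pvG pp (row - 1) (col - 1)) := by
  have hw : (row + 1).toNat = row.toNat + 1 := by omega
  apply List.ext_getElem
  · simp [PySem.List.length_pyRange_one, hw]
  · intro k h1 h2
    simp only [List.getElem_map, List.getElem_zip, PySem.List.getElem_pyRange_one]
    have hkw : k < (row + 1).toNat := by
      simp [hw] at h1; omega
    rw [padget _ _ _ hkw, padget _ _ _ hkw]
    rw [getD_if_cur pp row hrow k, getD_if_above pp row hrow k]
    rcases k with _ | k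
    · simp only [List.getElem_cons_zero]
      push_cast
      have hneg : pvG pp (row - 1) (-1) = 0 := by
        unfold pvG; rw [if_neg (by omega)]
      rw [hneg]
      ring
    · simp only [List.getElem_cons_succ, List.getElem_take]
      rw [padget', getD_if_above pp row hrow k]
      push_cast
      rw [show ((0:Int) + ((k:Int) + 1) - 1) = (k : Int) by ring,
          show ((0:Int) + ((k:Int) + 1)) = (k : Int) + 1 by ring]
      ring

-- ===== VERDICT (by name: the statement is the Claim_ definition above) =====
theorem pascalPlane_spec : Claim_equal_pascalPlane := by
  intro n pp _
  show pascalPlane n pp = pascalPlane_alt n pp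
  unfold pascalPlane pascalPlane_alt
  apply PySem.List.foldl_congr_mem
  intro acc row hmem
  have h0 : (0:Int) ≤ row := (PySem.List.mem_pyRange_one.mp hmem).1
  rw [rowA_eq]
  simp only []
  rw [← rowB_eq pp row h0]
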